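-- pv_equiv track=rewrite | github.com/kimjune01/june.kim | worklog/shelling_exchange2.py | is_convex
-- ===== SOURCE A (Python) =====
-- def is_convex(S_set, chambers, adj):
--     """Check if S is convex in the chamber graph (closed under shortest paths)."""
--     # BFS shortest paths between all pairs in S
--     n = len(chambers)
--     for u in S_set:
--         # BFS from u
--         dist = {u: 0}
--         parent = {u: []}
--         queue = [u]
--         qi = 0
--         while qi < len(queue):
--             v = queue[qi]; qi += 1
--             for w in adj[v]:
--                 if w not in dist:
--                     dist[w] = dist[v] + 1
--                     queue.append(w)
--
--         # For each other vertex in S, check if there's a shortest path leaving S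
--         # Actually, we need: for every shortest path from u to v (both in S),
--         # all intermediate vertices are in S.
--         # Simpler check: BFS restricted to S should give same distances as BFS in full graph
--
--         dist_restricted = {u: 0}
--         queue2 = [u]
--         qi2 = 0
--         while qi2 < len(queue2):
--             v = queue2[qi2]; qi2 += 1
--             for w in adj[v]:
--                 if w in S_set and w not in dist_restricted:
--                     dist_restricted[w] = dist_restricted[v] + 1
--                     queue2.append(w)
--
--         for v in S_set:
--             if v == u: continue
--             if v not in dist_restricted:
--                 return False  # not even connected in S
--             if dist_restricted[v] != dist[v]:
--                 return False  # shortest path leaves S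
--
--     return True
-- ===== SOURCE B (Python) =====
-- def is_convex(S_set, chambers, adj):
--     """Check if S is convex in the chamber graph (closed under shortest paths)."""
--     # Level-synchronized BFS gives full-graph distances from u; convexity is then
--     # checked locally instead of by a second restricted BFS: every other v in S must
--     # be reachable and have some w in S one level closer to u with an edge w -> v
--     # (descending such levels yields an all-in-S shortest path from u to v).
--     for u in S_set:
--         dist = {u: 0}
--         frontier = [u]
--         d = 0
--         while frontier:
--             d += 1
--             nxt = []
--             for v in frontier:
--                 for w in adj[v]:
--                     if w not in dist:
--                         dist[w] = d
--                         nxt.append(w)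
--             frontier = nxt
--         for v in S_set:
--             if v == u:
--                 continue
--             if v not in dist:
--                 return False
--             if not any(dist.get(w) == dist[v] - 1 and v in adj[w] for w in S_set):
--                 return False
--     return True
-- ===== Notes on version B (the rewrite author's own statement) =====
-- stated objective: alternative
-- what changed: B drops A's second S-restricted BFS per source entirely: it computes full-graph distances by a level-synchronized (frontier/next-layer) BFS instead of A's index-into-queue BFS, and then verifies convexity by a local predecessor test (every other v in S must be reachable and have some w in S one level closer to u with an edge w->v).
import Mathlib
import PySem

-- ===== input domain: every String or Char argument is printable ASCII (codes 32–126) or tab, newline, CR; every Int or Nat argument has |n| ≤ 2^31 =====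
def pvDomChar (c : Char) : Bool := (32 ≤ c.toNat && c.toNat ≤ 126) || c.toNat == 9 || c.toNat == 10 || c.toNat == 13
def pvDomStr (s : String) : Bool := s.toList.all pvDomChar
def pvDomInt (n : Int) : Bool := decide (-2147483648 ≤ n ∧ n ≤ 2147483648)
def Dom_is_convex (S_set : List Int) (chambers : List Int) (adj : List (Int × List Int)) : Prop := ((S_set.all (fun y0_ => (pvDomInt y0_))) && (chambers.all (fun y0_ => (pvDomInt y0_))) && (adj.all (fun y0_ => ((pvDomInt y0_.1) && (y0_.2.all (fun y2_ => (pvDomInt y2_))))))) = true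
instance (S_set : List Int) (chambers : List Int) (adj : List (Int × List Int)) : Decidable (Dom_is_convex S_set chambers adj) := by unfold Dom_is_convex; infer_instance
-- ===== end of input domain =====

-- B replaces A's second (S-restricted) BFS per source by a level-synchronized BFS for the
-- full-graph distances plus a local in-S-predecessor test (an alternative algorithm of
-- similar cost; return value only, neither version mutates its arguments).

-- ===== PORT A =====
-- adj[v] : dict lookup; KeyError (v absent) is excluded by Pre_is_convex, so the total getD form is exact.
def pvAdjGet (adj : List (Int × List Int)) (v : Int) : List Int :=
  PySem.Dict.getD (PySem.Dict.mk adj) v []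

-- A's BFS 'while qi < len(queue)' loop, indexing into the growing queue.  A's two BFS
-- passes differ only in the admission test on a discovered neighbour w: the full BFS
-- admits every w ('keep' ≡ true makes 'keep w && fresh' literally 'fresh'), the
-- restricted one admits 'w in S_set and w not in dist_restricted'.  'fuel' only makes
-- the recursion structurally terminating; it is never exhausted (each iteration consumes
-- one queue slot and the queue provably never exceeds pvFuel).
def pvBfsLoop (adj : List (Int × List Int)) (keep : Int → Bool) :
    Nat → PySem.Dict Int Int → List Int → Nat → PySem.Dict Int Int
  | 0, dist, _, _ => dist
  | fuel+1, dist, queue, qi =>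
    if h : qi < queue.length then
      let v := queue[qi]
      let s := (pvAdjGet adj v).foldl
        (fun (s : PySem.Dict Int Int × List Int) w =>
          if keep w && !(s.1.contains w) then
            (s.1.insert w (s.1.getD v 0 + 1), s.2 ++ [w])
          else s) (dist, queue)
      pvBfsLoop adj keep fuel s.1 s.2 (qi+1)
    else dist

def pvFuel (adj : List (Int × List Int)) : Nat :=
  adj.foldl (fun a kv => a + kv.2.length) 0 + 1

def pvBfs (adj : List (Int × List Int)) (keep : Int → Bool) (u : Int) : PySem.Dict Int Int :=
  pvBfsLoop adj keep (pvFuel adj) ((PySem.Dict.empty).insert u 0) [u] 0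

-- A: per source u, a full BFS ('dist') and an S-restricted BFS ('dist_restricted'), then
-- compare distances on S.  ('n = len(chambers)' and the 'parent' dict of the source are
-- dead code and are not ported.)  'dist[v]' in the final compare is total here via getD:
-- under Pre_ a key of dist_restricted is provably a key of dist (lemma pvL0 below).
def is_convex (S_set : List Int) (chambers : List Int) (adj : List (Int × List Int)) : Bool :=
  S_set.all (fun u =>
    let dist := pvBfs adj (fun _ => true) u
    let distR := pvBfs adj (fun w => S_set.contains w) u
    S_set.all (fun v =>
      if v == u then true
      else if !(distR.contains v) then false
      else distR.getD v 0 == dist.getD v 0))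

-- ===== PORT B =====
-- B's BFS is level-synchronized: 'if w not in dist: dist[w] = d; nxt.append(w)'.
def pvStepB (c : Int) (s : PySem.Dict Int Int × List Int) (w : Int) :
    PySem.Dict Int Int × List Int :=
  if s.1.contains w then s else (s.1.insert w c, s.2 ++ [w])

-- 'while frontier: d += 1; nxt = []; for v in frontier: for w in adj[v]: …; frontier = nxt'.
-- 'fuel' only makes the recursion structurally terminating; it is never exhausted.
def pvLevelLoop (adj : List (Int × List Int)) :
    Nat → PySem.Dict Int Int → List Int → Int → PySem.Dict Int Int
  | 0, dist, _, _ => dist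
  | fuel+1, dist, frontier, d =>
    if frontier.isEmpty then dist
    else
      let s := frontier.foldl (fun s v => (pvAdjGet adj v).foldl (pvStepB (d + 1)) s) (dist, [])
      pvLevelLoop adj fuel s.1 s.2 (d + 1)

def pvLevelBfs (adj : List (Int × List Int)) (u : Int) : PySem.Dict Int Int :=
  pvLevelLoop adj (pvFuel adj) ((PySem.Dict.empty).insert u 0) [u] 0

-- B: per source u, ONE level-BFS; then every other v in S must be a key of dist and have
-- some w in S with 'dist.get(w) == dist[v] - 1 and v in adj[w]' (short-circuit: adj[w]
-- is only read when w is a key of dist, so it cannot raise where the BFS did not).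
def is_convex_alt (S_set : List Int) (chambers : List Int) (adj : List (Int × List Int)) : Bool :=
  S_set.all (fun u =>
    let dist := pvLevelBfs adj u
    S_set.all (fun v =>
      if v == u then true
      else if !(dist.contains v) then false
      else S_set.any (fun w =>
        (dist.get? w == some (dist.getD v 0 - 1)) && (pvAdjGet adj w).contains v)))

-- ===== PRECONDITION & SPEC =====
-- Vertices reachable from u following edges whose target satisfies filt (a graph-closure
-- predicate; the iteration count only saturates the closure).  Used only by Pre_.
def pvReachFrom (adj : List (Int × List Int)) (filt : Int → Bool) (u : Int) : List Int :=
  (fun T => PySem.Set.update T ((T.flatMap (pvAdjGet adj)).filter filt))^[pvFuel adj + adj.length + 1]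
    (PySem.Set.ofList [u])

-- 'every vertex reachable from u has an adjacency entry' — i.e. the BFS from u cannot raise.
def pvCov (adj : List (Int × List Int)) (u : Int) : Prop :=
  ∀ x ∈ pvReachFrom adj (fun _ => true) u, x ∈ adj.map Prod.fst

-- Pre_ excludes exactly the inputs on which Python A raises KeyError: A raises iff the BFS
-- from the FIRST source hits a vertex with no adj entry, or — when every member of S_set is
-- reachable from the first source inside S_set (so no earlier check can return False for
-- lack of reachability) — the BFS from some later source does.  On every input on which A
-- returns a value, Pre_ holds; B raises on exactly the same excluded inputs.
def Pre_is_convex (S_set : List Int) (chambers : List Int) (adj : List (Int × List Int)) : Prop :=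
  ∀ u0 ∈ S_set.take 1,
    pvCov adj u0 ∧
    ((∀ v ∈ S_set, v ∈ pvReachFrom adj (fun w => S_set.contains w) u0) →
      ∀ u ∈ S_set, pvCov adj u)
instance (S_set : List Int) (chambers : List Int) (adj : List (Int × List Int)) : Decidable (Pre_is_convex S_set chambers adj) := by unfold Pre_is_convex pvCov; infer_instance

def pvWitness_is_convex : List Int × List Int × (List (Int × List Int)) :=
  ([0, 1], [0, 1, 2], [(0, [1]), (1, [0]), (2, [0])])

def Spec_is_convex (S_set : List Int) (chambers : List Int) (adj : List (Int × List Int)) (out : Bool) : Prop := out = is_convex_alt S_set chambers adj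
instance (S_set : List Int) (chambers : List Int) (adj : List (Int × List Int)) (out : Bool) : Decidable (Spec_is_convex S_set chambers adj out) := by unfold Spec_is_convex; infer_instance

-- ===== CLAIM (what is proved, stated in full; the proofs are below) =====
def Claim_equal_is_convex : Prop := ∀ (S_set : List Int) (chambers : List Int) (adj : List (Int × List Int)), Dom_is_convex S_set chambers adj → Pre_is_convex S_set chambers adj → Spec_is_convex S_set chambers adj (is_convex S_set chambers adj)

-- ===== LEMMAS AND PROOFS =====

-- ---- A-side BFS invariant (queue-indexing loop) ----

def pvStep (keep : Int → Bool) (v : Int) (s : PySem.Dict Int Int × List Int) (w : Int) :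
    PySem.Dict Int Int × List Int :=
  if keep w && !(s.1.contains w) then (s.1.insert w (s.1.getD v 0 + 1), s.2 ++ [w]) else s

structure PvFold (keep : Int → Bool) (ns : List Int) (c : Int)
    (d : PySem.Dict Int Int) (q : List Int)
    (d' : PySem.Dict Int Int) (q' : List Int) : Prop where
  qext : q' = q ++ q'.drop q.length
  pres : ∀ x dx, d.get? x = some dx → d'.get? x = some dx
  fresh : ∀ x dx, d'.get? x = some dx → d.get? x = some dx ∨ (dx = c + 1 ∧ keep x = true ∧ x ∈ ns ∧ x ∉ q)
  appmem : ∀ x ∈ q'.drop q.length, d'.get? x = some (c + 1) ∧ x ∉ q ∧ keep x = true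
  mem' : ∀ x, d'.contains x = true ↔ x ∈ q'
  nodupq' : q'.Nodup
  nodupk' : d'.keys.Nodup
  covered : ∀ x ∈ ns, keep x = true → ∃ dx, d'.get? x = some dx ∧ (d.get? x = some dx ∨ dx = c + 1)

theorem pvFold_spec (keep : Int → Bool) (v : Int) (ns : List Int) (c : Int) :
    ∀ (d : PySem.Dict Int Int) (q : List Int),
    d.get? v = some c →
    (∀ x, d.contains x = true ↔ x ∈ q) →
    q.Nodup → d.keys.Nodup →
    PvFold keep ns c d q (ns.foldl (pvStep keep v) (d, q)).1 (ns.foldl (pvStep keep v) (d, q)).2 := by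
  induction ns with
  | nil =>
    intro d q hv hmem hnq hnk
    exact { qext := by simp, pres := fun x dx h => h,
            fresh := fun x dx h => Or.inl h,
            appmem := by simp, mem' := hmem, nodupq' := hnq, nodupk' := hnk,
            covered := by simp }
  | cons w ns ih =>
    intro d q hv hmem hnq hnk
    by_cases hc : (keep w && !(d.contains w)) = true
    · -- fresh insert of w
      have hkw : keep w = true := (Bool.and_eq_true_iff.mp hc).1
      have hwd : d.contains w = false := by
        have := (Bool.and_eq_true_iff.mp hc).2; simpa using this
      have hwq : w ∉ q := fun h => by simp [(hmem w).mpr h] at hwd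
      have hgD : d.getD v 0 = c := PySem.Dict.getD_of_get?_eq_some d 0 hv
      have hwv : w ≠ v := fun h => by
        subst h; rw [PySem.Dict.contains_eq_isSome_get? d, hv] at hwd; simp at hwd
      have hwnone : d.get? w = none := by
        rw [PySem.Dict.contains_eq_isSome_get? d w] at hwd
        exact Option.not_isSome_iff_eq_none.mp (by simp [hwd])
      have hstep : (List.foldl (pvStep keep v) (d, q) (w :: ns)) =
          List.foldl (pvStep keep v) (d.insert w (c + 1), q ++ [w]) ns := by
        simp only [List.foldl_cons]
        congr 1
        simp [pvStep, hc, hgD]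
      set d1 := d.insert w (c + 1) with hd1
      have hv1 : d1.get? v = some c := by
        rw [hd1, PySem.Dict.get?_insert_of_ne d (c+1) hwv.symm]; exact hv
      have hmem1 : ∀ x, d1.contains x = true ↔ x ∈ q ++ [w] := by
        intro x
        rw [hd1, PySem.Dict.contains_insert d w x (c+1)]
        constructor
        · intro h
          rcases Bool.or_eq_true_iff.mp h with h | h
          · simp [beq_iff_eq.mp h]
          · exact List.mem_append_left _ ((hmem x).mp h)
        · intro h
          rcases List.mem_append.mp h with h | h
          · exact Bool.or_eq_true_iff.mpr (Or.inr ((hmem x).mpr h))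
          · simp at h; simp [h]
      have hnq1 : (q ++ [w]).Nodup := by
        simp only [List.nodup_append, List.nodup_cons]
        refine ⟨hnq, by simp, ?_⟩
        intro a ha e he
        simp only [List.mem_singleton] at he
        subst he
        intro h2
        subst h2
        exact hwq ha
      have hnk1 : d1.keys.Nodup := PySem.Dict.nodup_keys_insert d w (c+1) hnk
      have IH := ih d1 (q ++ [w]) hv1 hmem1 hnq1 hnk1
      rw [hstep]
      set r := List.foldl (pvStep keep v) (d1, q ++ [w]) ns with hr
      have hget1 : ∀ x, d1.get? x = if x = w then some (c+1) else d.get? x := by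
        intro x
        by_cases hx : x = w
        · subst hx; simp [hd1, PySem.Dict.get?_insert_self]
        · rw [hd1, PySem.Dict.get?_insert_of_ne d (c+1) hx]; simp [hx]
      have happ : r.2.drop q.length = w :: r.2.drop (q.length + 1) := by
        have := IH.qext
        rw [this]
        rw [List.append_assoc] at this ⊢
        rw [List.drop_left]
        simp
      refine { qext := ?_, pres := ?_, fresh := ?_, appmem := ?_, mem' := IH.mem', nodupq' := IH.nodupq', nodupk' := IH.nodupk', covered := ?_ }
      · rw [happ]
        have := IH.qext
        rw [this, List.append_assoc]
        simp
      · intro x dx h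
        apply IH.pres
        rw [hget1]
        have : x ≠ w := fun hxw => by subst hxw; rw [hwnone] at h; cases h
        simp [this, h]
      · intro x dx h
        rcases IH.fresh x dx h with h1 | ⟨h1, h2, h3, h4⟩
        · rw [hget1] at h1
          by_cases hx : x = w
          · subst hx; simp at h1
            exact Or.inr ⟨h1.symm, hkw, by simp, hwq⟩
          · simp [hx] at h1; exact Or.inl h1
        · refine Or.inr ⟨h1, h2, by simp [h3], fun hq => h4 (by simp [hq])⟩
      · intro x hx
        rw [happ] at hx
        rcases List.mem_cons.mp hx with hx | hx
        · subst hx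
          refine ⟨IH.pres _ _ (by rw [hget1]; simp), hwq, hkw⟩
        · have := IH.appmem x (by simpa using hx)
          exact ⟨this.1, fun hq => this.2.1 (by simp [hq]), this.2.2⟩
      · intro x hx hkx
        rcases List.mem_cons.mp hx with hx | hx
        · subst hx
          refine ⟨c + 1, IH.pres _ _ (by rw [hget1]; simp), Or.inr rfl⟩
        · rcases IH.covered x hx hkx with ⟨dx, hdx, hor⟩
          refine ⟨dx, hdx, ?_⟩
          rcases hor with h1 | h1
          · rw [hget1] at h1
            by_cases hxw : x = w
            · subst hxw; simp at h1; exact Or.inr h1.symm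
            · simp [hxw] at h1; exact Or.inl h1
          · exact Or.inr h1
    · -- skipped
      have hstep : (List.foldl (pvStep keep v) (d, q) (w :: ns)) =
          List.foldl (pvStep keep v) (d, q) ns := by
        simp only [List.foldl_cons]
        congr 1
        simp [pvStep, hc]
      rw [hstep]
      have IH := ih d q hv hmem hnq hnk
      refine { qext := IH.qext, pres := IH.pres, fresh := ?_, appmem := IH.appmem, mem' := IH.mem', nodupq' := IH.nodupq', nodupk' := IH.nodupk', covered := ?_ }
      · intro x dx h
        rcases IH.fresh x dx h with h1 | ⟨h1, h2, h3, h4⟩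
        · exact Or.inl h1
        · exact Or.inr ⟨h1, h2, by simp [h3], h4⟩
      · intro x hx hkx
        rcases List.mem_cons.mp hx with hx | hx
        · subst hx
          have hxd : d.contains x = true := by
            by_contra hxd
            apply hc
            simp [hkx, Bool.not_eq_true] at hxd ⊢
            simp [hxd]
          rw [PySem.Dict.contains_eq_isSome_get? d x] at hxd
          rcases Option.isSome_iff_exists.mp (by simpa using hxd) with ⟨dx, hdx⟩
          exact ⟨dx, IH.pres _ _ hdx, Or.inl hdx⟩
        · exact IH.covered x hx hkx

structure PvInv (adj : List (Int × List Int)) (keep : Int → Bool) (u : Int)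
    (dist : PySem.Dict Int Int) (queue : List Int) (qi : Nat) : Prop where
  mem_iff : ∀ x, dist.contains x = true ↔ x ∈ queue
  nodupq : queue.Nodup
  nodupk : dist.keys.Nodup
  qle : qi ≤ queue.length
  at_u : dist.get? u = some 0
  parent : ∀ v dv, dist.get? v = some dv → v ≠ u →
    keep v = true ∧ ∃ w dw, dist.get? w = some dw ∧ v ∈ pvAdjGet adj w ∧ dv = dw + 1 ∧ 0 ≤ dw
  nonneg : ∀ v dv, dist.get? v = some dv → 0 ≤ dv
  mono : (queue.map (fun x => dist.getD x 0)).Pairwise (· ≤ ·)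
  bound : ∀ (hl : queue ≠ []) (h : qi < queue.length),
    dist.getD (queue.getLast hl) 0 ≤ dist.getD queue[qi] 0 + 1
  done : ∀ i (h : i < queue.length), i < qi → ∀ x ∈ pvAdjGet adj queue[i], keep x = true →
    ∃ dx, dist.get? x = some dx ∧ dx ≤ dist.getD queue[i] 0 + 1

theorem pv_mono_getElem {dist : PySem.Dict Int Int} {queue : List Int}
    (hm : (queue.map (fun x => dist.getD x 0)).Pairwise (· ≤ ·))
    (i j : Nat) (hj : j < queue.length) (hij : i ≤ j) :
    dist.getD (queue[i]'(lt_of_le_of_lt hij hj)) 0 ≤ dist.getD queue[j] 0 := by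
  rcases Nat.lt_or_ge i j with h | h
  · have := (List.pairwise_iff_getElem.mp hm) i j (by simpa using lt_of_le_of_lt hij hj) (by simpa using hj) h
    simpa using this
  · have : i = j := le_antisymm hij h
    subst this; exact le_refl _

theorem pv_mem_le_last {dist : PySem.Dict Int Int} {queue : List Int}
    (hm : (queue.map (fun x => dist.getD x 0)).Pairwise (· ≤ ·))
    {x : Int} (hx : x ∈ queue) (hl : queue ≠ []) :
    dist.getD x 0 ≤ dist.getD (queue.getLast hl) 0 := by
  rcases List.mem_iff_getElem.mp hx with ⟨i, hi, rfl⟩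
  rw [List.getLast_eq_getElem]
  exact pv_mono_getElem hm i (queue.length - 1) (by omega) (by omega)

theorem pvInv_step {adj : List (Int × List Int)} {keep : Int → Bool} {u : Int}
    {dist : PySem.Dict Int Int} {queue : List Int} {qi : Nat}
    (Inv : PvInv adj keep u dist queue qi) (h : qi < queue.length) :
    PvInv adj keep u
      ((pvAdjGet adj queue[qi]).foldl (pvStep keep queue[qi]) (dist, queue)).1
      ((pvAdjGet adj queue[qi]).foldl (pvStep keep queue[qi]) (dist, queue)).2 (qi+1) := by
  set v := queue[qi] with hvdef
  have hvq : v ∈ queue := List.getElem_mem h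
  have hvc : dist.contains v = true := (Inv.mem_iff v).mpr hvq
  rw [PySem.Dict.contains_eq_isSome_get?] at hvc
  rcases Option.isSome_iff_exists.mp (by simpa using hvc) with ⟨cv, hcv⟩
  have hcvD : dist.getD v 0 = cv := PySem.Dict.getD_of_get?_eq_some dist 0 hcv
  have F := pvFold_spec keep v (pvAdjGet adj v) cv dist queue hcv Inv.mem_iff Inv.nodupq Inv.nodupk
  set d' := ((pvAdjGet adj v).foldl (pvStep keep v) (dist, queue)).1 with hd'
  set q' := ((pvAdjGet adj v).foldl (pvStep keep v) (dist, queue)).2 with hq'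
  clear_value d' q'
  obtain ⟨app, rfl⟩ : ∃ app, q' = queue ++ app := ⟨_, F.qext⟩
  have happmem : ∀ x ∈ app, d'.get? x = some (cv + 1) ∧ x ∉ queue ∧ keep x = true := by
    have := F.appmem
    simpa [List.drop_left] using this
  have hql : queue ≠ [] := List.ne_nil_of_length_pos (by omega)
  have valpres : ∀ x ∈ queue, d'.getD x 0 = dist.getD x 0 := by
    intro x hx
    have := (Inv.mem_iff x).mpr hx
    rw [PySem.Dict.contains_eq_isSome_get?] at this
    rcases Option.isSome_iff_exists.mp (by simpa using this) with ⟨dx, hdx⟩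
    rw [PySem.Dict.getD_of_get?_eq_some dist 0 hdx,
        PySem.Dict.getD_of_get?_eq_some d' 0 (F.pres x dx hdx)]
  have vle : ∀ x ∈ queue, dist.getD x 0 ≤ cv + 1 := by
    intro x hx
    calc dist.getD x 0 ≤ dist.getD (queue.getLast hql) 0 := pv_mem_le_last Inv.mono hx hql
      _ ≤ dist.getD queue[qi] 0 + 1 := Inv.bound hql h
      _ = cv + 1 := by rw [← hvdef, hcvD]
  have appval : ∀ x ∈ app, d'.getD x 0 = cv + 1 := fun x hx =>
    PySem.Dict.getD_of_get?_eq_some d' 0 (happmem x hx).1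
  have hvd' : d'.get? v = some cv := F.pres v cv hcv
  have hvald' : d'.getD v 0 = cv := PySem.Dict.getD_of_get?_eq_some d' 0 hvd'
  have hgetelem : ∀ (i : Nat) (hi : i < queue.length), (queue ++ app)[i]'(by simp; omega) = queue[i] :=
    fun i hi => List.getElem_append_left hi
  refine { mem_iff := F.mem', nodupq := F.nodupq', nodupk := F.nodupk', qle := ?_,
           at_u := F.pres u 0 Inv.at_u, parent := ?_, nonneg := ?_, mono := ?_,
           bound := ?_, done := ?_ }
  · simp; omega
  · intro x dx hx hne
    rcases F.fresh x dx hx with hold | ⟨he, hk, hmem, _⟩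
    · rcases Inv.parent x dx hold hne with ⟨hk, w, dw, hw, hmemw, heq, hnn⟩
      exact ⟨hk, w, dw, F.pres w dw hw, hmemw, heq, hnn⟩
    · exact ⟨hk, v, cv, hvd', hmem, he, Inv.nonneg v cv hcv⟩
  · intro x dx hx
    rcases F.fresh x dx hx with hold | ⟨he, _, _, _⟩
    · exact Inv.nonneg x dx hold
    · have := Inv.nonneg v cv hcv; omega
  · rw [List.map_append, List.pairwise_append]
    refine ⟨?_, ?_, ?_⟩
    · rw [List.map_congr_left valpres]; exact Inv.mono
    · rw [List.pairwise_map]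
      refine List.pairwise_iff_getElem.mpr ?_
      intro i j hi hj hij
      rw [appval _ (List.getElem_mem hi), appval _ (List.getElem_mem hj)]
    · intro a ha b hb
      rcases List.mem_map.mp ha with ⟨x, hx, rfl⟩
      rcases List.mem_map.mp hb with ⟨y, hy, rfl⟩
      rw [valpres x hx, appval y hy]
      exact vle x hx
  · intro hl' h'
    by_cases happ : app = []
    · subst happ
      have hlen : qi + 1 < queue.length := by simpa using h'
      have e1 : (queue ++ ([] : List Int)).getLast hl' = queue.getLast hql := by
        congr 1 <;> simp
      rw [e1, valpres _ (List.getLast_mem hql), hgetelem (qi+1) hlen,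
          valpres _ (List.getElem_mem hlen)]
      calc dist.getD (queue.getLast hql) 0 ≤ dist.getD queue[qi] 0 + 1 := Inv.bound hql h
        _ ≤ dist.getD queue[qi+1] 0 + 1 := by
            have := pv_mono_getElem Inv.mono qi (qi+1) hlen (by omega)
            omega
    · have hlast_mem : (queue ++ app).getLast hl' ∈ app := by
        rw [List.getLast_append_of_ne_nil hl' happ]
        exact List.getLast_mem happ
      rw [appval _ hlast_mem]
      by_cases hqi1 : qi + 1 < queue.length
      · rw [hgetelem (qi+1) hqi1, valpres _ (List.getElem_mem hqi1)]
        have := pv_mono_getElem Inv.mono qi (qi+1) hqi1 (by omega)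
        rw [← hvdef, hcvD] at this
        omega
      · have hge : queue.length ≤ qi + 1 := by omega
        have hmem : (queue ++ app)[qi+1] ∈ app := by
          rw [List.getElem_append_right hge]
          exact List.getElem_mem (by simp at h' ⊢; omega)
        rw [appval _ hmem]
        omega
  · intro i hi hlt x hxadj hkx
    by_cases hiq : i < qi
    · have hiql : i < queue.length := by omega
      rw [hgetelem i hiql] at hxadj ⊢
      rcases Inv.done i hiql hiq x hxadj hkx with ⟨dx, hdx, hle⟩
      refine ⟨dx, F.pres x dx hdx, ?_⟩
      rw [valpres _ (List.getElem_mem hiql)]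
      exact hle
    · have hieq : i = qi := by omega
      subst hieq
      rw [hgetelem i h] at hxadj ⊢
      rw [← hvdef] at hxadj ⊢
      rcases F.covered x hxadj hkx with ⟨dx, hdx, hor⟩
      refine ⟨dx, hdx, ?_⟩
      rw [hvald']
      rcases hor with hold | hnew
      · have hxq : x ∈ queue := by
          have : dist.contains x = true := by
            rw [PySem.Dict.contains_eq_isSome_get?, hold]; rfl
          exact (Inv.mem_iff x).mp this
        have := vle x hxq
        rw [PySem.Dict.getD_of_get?_eq_some dist 0 hold] at this
        exact this
      · omega

theorem pvAdjGet_sub {adj : List (Int × List Int)} {w x : Int}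
    (hx : x ∈ pvAdjGet adj w) : x ∈ adj.flatMap Prod.snd := by
  unfold pvAdjGet at hx
  rcases hget : (PySem.Dict.mk adj).get? w with _ | l
  · rw [PySem.Dict.getD_of_get?_eq_none _ _ hget] at hx
    · cases hx
  · rw [PySem.Dict.getD_of_get?_eq_some _ [] hget] at hx
    have hmem := PySem.Dict.mem_items_of_get?_eq_some _ hget
    exact List.mem_flatMap.mpr ⟨(w, l), hmem, hx⟩

-- shared key-count bound: keys with a parent pointer all lie in u :: all-neighbour-lists
theorem pvKeys_len_le {adj : List (Int × List Int)} {u : Int} {dist : PySem.Dict Int Int}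
    (hnk : dist.keys.Nodup)
    (hpar : ∀ v, dist.contains v = true → v ≠ u → ∃ w, v ∈ pvAdjGet adj w) :
    dist.keys.length ≤ pvFuel adj := by
  have hsub : dist.keys ⊆ u :: adj.flatMap Prod.snd := by
    intro x hx
    have hc : dist.contains x = true := (PySem.Dict.contains_iff_mem_keys _ _).mpr hx
    by_cases hxu : x = u
    · simp [hxu]
    · rcases hpar x hc hxu with ⟨w, hmemw⟩
      exact List.mem_cons.mpr (Or.inr (pvAdjGet_sub hmemw))
  have hlen : dist.keys.length ≤ (u :: adj.flatMap Prod.snd).length :=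
    calc dist.keys.length = dist.keys.toFinset.card := (List.toFinset_card_of_nodup hnk).symm
      _ ≤ (u :: adj.flatMap Prod.snd).toFinset.card := Finset.card_le_card (fun x hx => by
          simp only [List.mem_toFinset] at *; exact hsub hx)
      _ ≤ (u :: adj.flatMap Prod.snd).length := (u :: adj.flatMap Prod.snd).toFinset_card_le
  have hflat : (adj.flatMap Prod.snd).length = adj.foldl (fun a kv => a + kv.2.length) 0 := by
    rw [List.length_flatMap, List.sum_eq_foldl, List.foldl_map]
  unfold pvFuel
  simp only [List.length_cons] at hlen
  omega

theorem pvInv_len_le {adj : List (Int × List Int)} {keep : Int → Bool} {u : Int}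
    {dist : PySem.Dict Int Int} {queue : List Int} {qi : Nat}
    (Inv : PvInv adj keep u dist queue qi) : queue.length ≤ pvFuel adj := by
  have hperm : queue.length = dist.keys.length := by
    apply List.Perm.length_eq
    rw [List.perm_ext_iff_of_nodup Inv.nodupq Inv.nodupk]
    intro x
    rw [← PySem.Dict.contains_iff_mem_keys, Inv.mem_iff]
  have := pvKeys_len_le Inv.nodupk (fun v hc hvu => by
    rw [PySem.Dict.contains_eq_isSome_get?] at hc
    rcases Option.isSome_iff_exists.mp (by simpa using hc) with ⟨dv, hdv⟩
    rcases Inv.parent v dv hdv hvu with ⟨_, w, dw, _, hmemw, _, _⟩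
    exact ⟨w, hmemw⟩)
  omega

structure PvOut (adj : List (Int × List Int)) (keep : Int → Bool) (u : Int)
    (d : PySem.Dict Int Int) : Prop where
  at_u : d.get? u = some 0
  parent : ∀ v dv, d.get? v = some dv → v ≠ u →
    keep v = true ∧ ∃ w dw, d.get? w = some dw ∧ v ∈ pvAdjGet adj w ∧ dv = dw + 1 ∧ 0 ≤ dw
  nonneg : ∀ v dv, d.get? v = some dv → 0 ≤ dv
  complete : ∀ w dw, d.get? w = some dw → ∀ x ∈ pvAdjGet adj w, keep x = true →
    ∃ dx, d.get? x = some dx ∧ dx ≤ dw + 1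

theorem pvFinal {adj : List (Int × List Int)} {keep : Int → Bool} {u : Int}
    {dist : PySem.Dict Int Int} {queue : List Int} {qi : Nat}
    (Inv : PvInv adj keep u dist queue qi) (hq : queue.length ≤ qi) :
    PvOut adj keep u dist := by
  refine { at_u := Inv.at_u, parent := Inv.parent, nonneg := Inv.nonneg, complete := ?_ }
  intro w dw hw x hx hkx
  have hc : dist.contains w = true := by
    rw [PySem.Dict.contains_eq_isSome_get?, hw]; rfl
  have hwq : w ∈ queue := (Inv.mem_iff w).mp hc
  rcases List.mem_iff_getElem.mp hwq with ⟨i, hi, rfl⟩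
  rcases Inv.done i hi (by omega) x hx hkx with ⟨dx, hdx, hle⟩
  refine ⟨dx, hdx, ?_⟩
  rw [PySem.Dict.getD_of_get?_eq_some dist 0 hw] at hle
  exact hle

theorem pvBfsLoop_eq_foldl (adj : List (Int × List Int)) (keep : Int → Bool)
    (fuel : Nat) (dist : PySem.Dict Int Int) (queue : List Int) (qi : Nat)
    (h : qi < queue.length) :
    pvBfsLoop adj keep (fuel+1) dist queue qi =
      pvBfsLoop adj keep fuel
        ((pvAdjGet adj queue[qi]).foldl (pvStep keep queue[qi]) (dist, queue)).1
        ((pvAdjGet adj queue[qi]).foldl (pvStep keep queue[qi]) (dist, queue)).2 (qi+1) := by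
  rw [pvBfsLoop]
  simp only [h, dite_true]
  rfl

theorem pvLoop_out {adj : List (Int × List Int)} {keep : Int → Bool} {u : Int} :
    ∀ (fuel : Nat) (dist : PySem.Dict Int Int) (queue : List Int) (qi : Nat),
    PvInv adj keep u dist queue qi → pvFuel adj ≤ fuel + qi →
    PvOut adj keep u (pvBfsLoop adj keep fuel dist queue qi) := by
  intro fuel
  induction fuel with
  | zero =>
    intro dist queue qi Inv hf
    have := pvInv_len_le Inv
    rw [pvBfsLoop]
    exact pvFinal Inv (by omega)
  | succ fuel ih =>
    intro dist queue qi Inv hf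
    by_cases h : qi < queue.length
    · rw [pvBfsLoop_eq_foldl adj keep fuel dist queue qi h]
      exact ih _ _ _ (pvInv_step Inv h) (by omega)
    · rw [pvBfsLoop]
      simp only [h, dite_false]
      exact pvFinal Inv (by omega)

theorem pvInv_init (adj : List (Int × List Int)) (keep : Int → Bool) (u : Int) :
    PvInv adj keep u ((PySem.Dict.empty).insert u 0) [u] 0 := by
  have hget : ∀ x, ((PySem.Dict.empty : PySem.Dict Int Int).insert u 0).get? x =
      if x = u then some 0 else none := by
    intro x
    by_cases hx : x = u
    · subst hx; simp [PySem.Dict.get?_insert_self]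
    · rw [PySem.Dict.get?_insert_of_ne _ _ hx, PySem.Dict.get?_empty]; simp [hx]
  refine { mem_iff := ?_, nodupq := by simp, nodupk := ?_, qle := by simp,
           at_u := by rw [hget]; simp, parent := ?_, nonneg := ?_, mono := by simp,
           bound := ?_, done := by intro i h hlt; omega }
  · intro x
    rw [PySem.Dict.contains_eq_isSome_get?, hget]
    by_cases hx : x = u <;> simp [hx]
  · exact PySem.Dict.nodup_keys_insert _ _ _ (by simpa using PySem.Dict.nodup_keys_empty)
  · intro v dv hv hne
    rw [hget] at hv
    simp [hne] at hv
  · intro v dv hv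
    rw [hget] at hv
    by_cases hx : v = u
    · simp [hx] at hv; omega
    · simp [hx] at hv
  · intro hl h
    simp

theorem pvBfs_out (adj : List (Int × List Int)) (keep : Int → Bool) (u : Int) :
    PvOut adj keep u (pvBfs adj keep u) := by
  unfold pvBfs
  exact pvLoop_out (pvFuel adj) _ _ 0 (pvInv_init adj keep u) (by omega)

-- ---- B-side BFS invariant (level-synchronized loop) ----

theorem pv_nested_eq_flat {σ : Type} (f : Int → List Int) (g : σ → Int → σ) :
    ∀ (l : List Int) (s : σ), l.foldl (fun s v => (f v).foldl g s) s = (l.flatMap f).foldl g s := by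
  intro l
  induction l with
  | nil => intro s; simp
  | cons a l ih => intro s; simp only [List.flatMap_cons, List.foldl_append, List.foldl_cons, ih]

structure PvFB (c : Int) (ns : List Int) (d0 : PySem.Dict Int Int) (acc : List Int)
    (d' : PySem.Dict Int Int) (acc' : List Int) : Prop where
  pres : ∀ x dx, d0.get? x = some dx → d'.get? x = some dx
  fresh : ∀ x dx, d'.get? x = some dx → d0.get? x = some dx ∨ (dx = c ∧ x ∈ ns)
  accpre : acc' = acc ++ acc'.drop acc.length
  newmem : ∀ x ∈ acc'.drop acc.length, d'.get? x = some c ∧ d0.contains x = false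
  keyacc : ∀ x, d'.contains x = true → d0.contains x = true ∨ x ∈ acc'.drop acc.length
  covered : ∀ x ∈ ns, ∃ dx, d'.get? x = some dx ∧ (d0.get? x = some dx ∨ dx = c)
  nodupk : d0.keys.Nodup → d'.keys.Nodup

theorem pvFB_spec (c : Int) : ∀ (ns : List Int) (d0 : PySem.Dict Int Int) (acc : List Int),
    PvFB c ns d0 acc (ns.foldl (pvStepB c) (d0, acc)).1 (ns.foldl (pvStepB c) (d0, acc)).2 := by
  intro ns
  induction ns with
  | nil =>
    intro d0 acc
    exact { pres := fun x dx h => h, fresh := fun x dx h => Or.inl h,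
            accpre := by simp, newmem := by simp, keyacc := fun x h => Or.inl h,
            covered := by simp, nodupk := fun h => h }
  | cons w ns ih =>
    intro d0 acc
    by_cases hc : d0.contains w = true
    · have hstep : List.foldl (pvStepB c) (d0, acc) (w :: ns) = List.foldl (pvStepB c) (d0, acc) ns := by
        simp only [List.foldl_cons]
        congr 1
        simp [pvStepB, hc]
      rw [hstep]
      have IH := ih d0 acc
      refine { pres := IH.pres, fresh := ?_, accpre := IH.accpre, newmem := IH.newmem,
               keyacc := IH.keyacc, covered := ?_, nodupk := IH.nodupk }
      · intro x dx h
        rcases IH.fresh x dx h with h1 | ⟨h1, h2⟩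
        · exact Or.inl h1
        · exact Or.inr ⟨h1, by simp [h2]⟩
      · intro x hx
        rcases List.mem_cons.mp hx with hx | hx
        · subst hx
          rw [PySem.Dict.contains_eq_isSome_get?] at hc
          rcases Option.isSome_iff_exists.mp (by simpa using hc) with ⟨dx, hdx⟩
          exact ⟨dx, IH.pres x dx hdx, Or.inl hdx⟩
        · exact IH.covered x hx
    · have hcf : d0.contains w = false := by simpa using hc
      have hwnone : d0.get? w = none := by
        rw [PySem.Dict.contains_eq_isSome_get?] at hcf
        exact Option.not_isSome_iff_eq_none.mp (by simp [hcf])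
      have hstep : List.foldl (pvStepB c) (d0, acc) (w :: ns) =
          List.foldl (pvStepB c) (d0.insert w c, acc ++ [w]) ns := by
        simp only [List.foldl_cons]
        congr 1
        simp [pvStepB, hcf]
      rw [hstep]
      set d1 := d0.insert w c with hd1
      have hget1 : ∀ x, d1.get? x = if x = w then some c else d0.get? x := by
        intro x
        by_cases hx : x = w
        · subst hx; simp [hd1, PySem.Dict.get?_insert_self]
        · rw [hd1, PySem.Dict.get?_insert_of_ne d0 c hx]; simp [hx]
      have IH := ih d1 (acc ++ [w])
      set r := List.foldl (pvStepB c) (d1, acc ++ [w]) ns with hr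
      have happ : r.2.drop acc.length = w :: r.2.drop (acc.length + 1) := by
        have := IH.accpre
        rw [this]
        rw [List.append_assoc] at this ⊢
        rw [List.drop_left]
        simp
      refine { pres := ?_, fresh := ?_, accpre := ?_, newmem := ?_, keyacc := ?_,
               covered := ?_, nodupk := ?_ }
      · intro x dx h
        apply IH.pres
        rw [hget1]
        have : x ≠ w := fun hxw => by subst hxw; rw [hwnone] at h; cases h
        simp [this, h]
      · intro x dx h
        rcases IH.fresh x dx h with h1 | ⟨h1, h2⟩
        · rw [hget1] at h1
          by_cases hx : x = w
          · subst hx; simp at h1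
            exact Or.inr ⟨h1.symm, by simp⟩
          · simp [hx] at h1; exact Or.inl h1
        · exact Or.inr ⟨h1, by simp [h2]⟩
      · rw [happ]
        have := IH.accpre
        rw [this, List.append_assoc]
        simp
      · intro x hx
        rw [happ] at hx
        rcases List.mem_cons.mp hx with hx | hx
        · subst hx
          exact ⟨IH.pres _ _ (by rw [hget1]; simp), hcf⟩
        · have := IH.newmem x (by simpa using hx)
          refine ⟨this.1, ?_⟩
          have h1 := this.2
          rw [hd1, PySem.Dict.contains_insert d0 w x c] at h1
          rcases Bool.or_eq_false_iff.mp h1 with ⟨_, h2⟩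
          exact h2
      · intro x hx
        rcases IH.keyacc x hx with h1 | h1
        · rw [hd1, PySem.Dict.contains_insert d0 w x c] at h1
          rcases Bool.or_eq_true_iff.mp h1 with h2 | h2
          · rw [happ]
            exact Or.inr (List.mem_cons.mpr (Or.inl (beq_iff_eq.mp h2)))
          · exact Or.inl h2
        · rw [happ]
          exact Or.inr (List.mem_cons.mpr (Or.inr (by simpa using h1)))
      · intro x hx
        rcases List.mem_cons.mp hx with hx | hx
        · subst hx
          exact ⟨c, IH.pres _ _ (by rw [hget1]; simp), Or.inr rfl⟩
        · rcases IH.covered x hx with ⟨dx, hdx, hor⟩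
          refine ⟨dx, hdx, ?_⟩
          rcases hor with h1 | h1
          · rw [hget1] at h1
            by_cases hxw : x = w
            · subst hxw; simp at h1; exact Or.inr h1.symm
            · simp [hxw] at h1; exact Or.inl h1
          · exact Or.inr h1
      · intro h
        exact IH.nodupk (PySem.Dict.nodup_keys_insert d0 w c h)

structure PvLB (adj : List (Int × List Int)) (u : Int)
    (dist : PySem.Dict Int Int) (frontier : List Int) (d : Int) : Prop where
  dnn : 0 ≤ d
  fval : ∀ x ∈ frontier, dist.get? x = some d
  vle : ∀ x dx, dist.get? x = some dx → dx ≤ d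
  at_u : dist.get? u = some 0
  parent : ∀ v dv, dist.get? v = some dv → v ≠ u →
    ∃ w dw, dist.get? w = some dw ∧ v ∈ pvAdjGet adj w ∧ dv = dw + 1 ∧ 0 ≤ dw
  nonneg : ∀ v dv, dist.get? v = some dv → 0 ≤ dv
  covered : ∀ w dw, dist.get? w = some dw → w ∉ frontier → ∀ x ∈ pvAdjGet adj w,
    ∃ dx, dist.get? x = some dx ∧ dx ≤ dw + 1
  nodupk : dist.keys.Nodup

theorem pvLB_step {adj : List (Int × List Int)} {u : Int}
    {dist : PySem.Dict Int Int} {frontier : List Int} {d : Int}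
    (Inv : PvLB adj u dist frontier d) :
    PvLB adj u
      (frontier.foldl (fun s v => (pvAdjGet adj v).foldl (pvStepB (d + 1)) s) (dist, [])).1
      (frontier.foldl (fun s v => (pvAdjGet adj v).foldl (pvStepB (d + 1)) s) (dist, [])).2
      (d + 1) := by
  rw [pv_nested_eq_flat (pvAdjGet adj) (pvStepB (d + 1)) frontier (dist, [])]
  set ns := frontier.flatMap (pvAdjGet adj) with hns
  have F := pvFB_spec (d + 1) ns dist []
  set d' := (ns.foldl (pvStepB (d + 1)) (dist, ([] : List Int))).1 with hd'
  set acc' := (ns.foldl (pvStepB (d + 1)) (dist, ([] : List Int))).2 with hacc'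
  clear_value d' acc'
  have hdrop : acc'.drop ([] : List Int).length = acc' := by simp
  have hnew : ∀ x ∈ acc', d'.get? x = some (d + 1) ∧ dist.contains x = false := by
    intro x hx; exact F.newmem x (by rwa [hdrop])
  refine { dnn := by have := Inv.dnn; omega, fval := ?_, vle := ?_,
           at_u := F.pres u 0 Inv.at_u, parent := ?_, nonneg := ?_,
           covered := ?_, nodupk := F.nodupk Inv.nodupk }
  · intro x hx; exact (hnew x hx).1
  · intro x dx hx
    rcases F.fresh x dx hx with h1 | ⟨h1, _⟩
    · have := Inv.vle x dx h1; omega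
    · omega
  · intro v dv hv hne
    rcases F.fresh v dv hv with h1 | ⟨h1, h2⟩
    · rcases Inv.parent v dv h1 hne with ⟨w, dw, hw, hmemw, heq, hnn⟩
      exact ⟨w, dw, F.pres w dw hw, hmemw, heq, hnn⟩
    · rcases List.mem_flatMap.mp (hns ▸ h2) with ⟨w, hwf, hmemw⟩
      exact ⟨w, d, F.pres w d (Inv.fval w hwf), hmemw, h1, Inv.dnn⟩
  · intro v dv hv
    rcases F.fresh v dv hv with h1 | ⟨h1, _⟩
    · exact Inv.nonneg v dv h1
    · have := Inv.dnn; omega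
  · intro w dw hw hwf x hxadj
    have hwc : d'.contains w = true := by
      rw [PySem.Dict.contains_eq_isSome_get?, hw]; rfl
    rcases F.keyacc w hwc with hold | hnewk
    · -- w was already a key before this layer
      rw [PySem.Dict.contains_eq_isSome_get?] at hold
      rcases Option.isSome_iff_exists.mp (by simpa using hold) with ⟨dw0, hdw0⟩
      have : d'.get? w = some dw0 := F.pres w dw0 hdw0
      have hdww : dw0 = dw := by rw [hw] at this; exact (Option.some.inj this).symm
      subst hdww
      by_cases hwfr : w ∈ frontier
      · -- processed in this layer: its neighbours are all in ns, hence covered now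
        have hxns : x ∈ ns := by
          rw [hns]; exact List.mem_flatMap.mpr ⟨w, hwfr, hxadj⟩
        rcases F.covered x hxns with ⟨dx, hdx, hor⟩
        refine ⟨dx, hdx, ?_⟩
        have hdwd : dw0 = d := by
          have := Inv.fval w hwfr
          rw [hdw0] at this; exact Option.some.inj this
        rcases hor with h1 | h1
        · have := Inv.vle x dx h1; omega
        · omega
      · rcases Inv.covered w dw0 hdw0 hwfr x hxadj with ⟨dx, hdx, hle⟩
        exact ⟨dx, F.pres x dx hdx, hle⟩
    · -- a newly inserted key is in the new frontier, excluded
      exact absurd (by rwa [hdrop] at hnewk) hwf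

theorem pvLB_final {adj : List (Int × List Int)} {u : Int}
    {dist : PySem.Dict Int Int} {d : Int} (Inv : PvLB adj u dist [] d) :
    PvOut adj (fun _ => true) u dist := by
  refine { at_u := Inv.at_u, parent := ?_, nonneg := Inv.nonneg, complete := ?_ }
  · intro v dv hv hne
    exact ⟨rfl, Inv.parent v dv hv hne⟩
  · intro w dw hw x hx _
    exact Inv.covered w dw hw (by simp) x hx

theorem pvChainVal {adj : List (Int × List Int)} {u : Int} {dist : PySem.Dict Int Int}
    (hu : dist.get? u = some 0)
    (hpar : ∀ v dv, dist.get? v = some dv → v ≠ u →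
      ∃ w dw, dist.get? w = some dw ∧ v ∈ pvAdjGet adj w ∧ dv = dw + 1 ∧ 0 ≤ dw) :
    ∀ (n : Nat) (x : Int) (dv : Int), dist.get? x = some dv → dv.toNat ≤ n →
      ∀ k : Int, 0 ≤ k → k ≤ dv → ∃ y, dist.get? y = some k := by
  intro n
  induction n with
  | zero =>
    intro x dv hx hn k hk0 hkd
    by_cases hxu : x = u
    · subst hxu
      have : dv = 0 := by rw [hu] at hx; exact (Option.some.inj hx).symm
      subst this
      have : k = 0 := by omega
      subst this
      exact ⟨_, hx⟩
    · rcases hpar x dv hx hxu with ⟨w, dw, _, _, heq, hnn⟩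
      omega
  | succ n ih =>
    intro x dv hx hn k hk0 hkd
    by_cases hxu : x = u
    · subst hxu
      have : dv = 0 := by rw [hu] at hx; exact (Option.some.inj hx).symm
      subst this
      have : k = 0 := by omega
      subst this
      exact ⟨_, hx⟩
    · rcases hpar x dv hx hxu with ⟨w, dw, hw, _, heq, hnn⟩
      by_cases hkdv : k = dv
      · subst hkdv; exact ⟨x, hx⟩
      · exact ih w dw hw (by omega) k hk0 (by omega)

theorem pvChainCount {dist : PySem.Dict Int Int} {d : Int}
    (hd : 0 ≤ d)
    (hch : ∀ k : Int, 0 ≤ k → k ≤ d → ∃ y, dist.get? y = some k) :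
    d.toNat + 1 ≤ dist.keys.length := by
  classical
  let f : Nat → Int := fun k =>
    if h : ∃ y, dist.get? y = some (k : Int) then h.choose else 0
  have hfk : ∀ k ∈ Finset.range (d.toNat + 1), dist.get? (f k) = some (k : Int) := by
    intro k hk
    simp only [Finset.mem_range] at hk
    have hex : ∃ y, dist.get? y = some (k : Int) := hch k (by positivity) (by omega)
    simp only [f, dif_pos hex]
    exact hex.choose_spec
  have hmaps : ∀ k ∈ Finset.range (d.toNat + 1), f k ∈ dist.keys.toFinset := by
    intro k hk
    rw [List.mem_toFinset, ← PySem.Dict.contains_iff_mem_keys,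
        PySem.Dict.contains_eq_isSome_get?, hfk k hk]
    rfl
  have hinj : ∀ k1 ∈ Finset.range (d.toNat + 1), ∀ k2 ∈ Finset.range (d.toNat + 1),
      f k1 = f k2 → k1 = k2 := by
    intro k1 h1 k2 h2 heq
    have e1 := hfk k1 h1
    have e2 := hfk k2 h2
    rw [heq, e2] at e1
    exact_mod_cast Option.some.inj e1.symm
  have := Finset.card_le_card_of_injOn f hmaps hinj
  calc d.toNat + 1 = (Finset.range (d.toNat + 1)).card := (Finset.card_range _).symm
    _ ≤ dist.keys.toFinset.card := this
    _ ≤ dist.keys.length := dist.keys.toFinset_card_le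

theorem pvLevel_out {adj : List (Int × List Int)} {u : Int} :
    ∀ (fuel : Nat) (dist : PySem.Dict Int Int) (frontier : List Int) (d : Int),
    PvLB adj u dist frontier d → pvFuel adj ≤ fuel + d.toNat →
    PvOut adj (fun _ => true) u (pvLevelLoop adj fuel dist frontier d) := by
  intro fuel
  induction fuel with
  | zero =>
    intro dist frontier d Inv hf
    rw [pvLevelLoop]
    rcases hfr : frontier with _ | ⟨x, fr⟩
    · exact pvLB_final (hfr ▸ Inv)
    · exfalso
      have hx : dist.get? x = some d := Inv.fval x (by rw [hfr]; simp)
      have hcnt := pvChainCount (Inv.nonneg x d hx)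
        (fun k hk0 hkd => pvChainVal Inv.at_u Inv.parent d.toNat x d hx (le_refl _) k hk0 hkd)
      have hkle := pvKeys_len_le (adj := adj) (u := u) Inv.nodupk (fun v hc hvu => by
        rw [PySem.Dict.contains_eq_isSome_get?] at hc
        rcases Option.isSome_iff_exists.mp (by simpa using hc) with ⟨dv, hdv⟩
        rcases Inv.parent v dv hdv hvu with ⟨w, dw, _, hmemw, _, _⟩
        exact ⟨w, hmemw⟩)
      omega
  | succ fuel ih =>
    intro dist frontier d Inv hf
    rw [pvLevelLoop]
    rcases hfr : frontier with _ | ⟨x, fr⟩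
    · simp only [List.isEmpty_nil, if_true]
      exact pvLB_final (hfr ▸ Inv)
    · simp only [List.isEmpty_cons, if_false, Bool.false_eq_true]
      have Inv' := pvLB_step (hfr ▸ Inv)
      have hd : 0 ≤ d := Inv.dnn
      exact ih _ _ _ Inv' (by omega)

theorem pvLB_init (adj : List (Int × List Int)) (u : Int) :
    PvLB adj u ((PySem.Dict.empty).insert u 0) [u] 0 := by
  have hget : ∀ x, ((PySem.Dict.empty : PySem.Dict Int Int).insert u 0).get? x =
      if x = u then some 0 else none := by
    intro x
    by_cases hx : x = u
    · subst hx; simp [PySem.Dict.get?_insert_self]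
    · rw [PySem.Dict.get?_insert_of_ne _ _ hx, PySem.Dict.get?_empty]; simp [hx]
  refine { dnn := le_refl 0, fval := ?_, vle := ?_, at_u := by rw [hget]; simp,
           parent := ?_, nonneg := ?_, covered := ?_, nodupk := ?_ }
  · intro x hx
    simp only [List.mem_singleton] at hx
    subst hx
    rw [hget]; simp
  · intro x dx hx
    rw [hget] at hx
    by_cases h : x = u
    · simp [h] at hx; omega
    · simp [h] at hx
  · intro v dv hv hne
    rw [hget] at hv
    simp [hne] at hv
  · intro v dv hv
    rw [hget] at hv
    by_cases h : v = u
    · simp [h] at hv; omega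
    · simp [h] at hv
  · intro w dw hw hwf x hx
    rw [hget] at hw
    by_cases h : w = u
    · exact absurd (by simp [h]) hwf
    · simp [h] at hw
  · exact PySem.Dict.nodup_keys_insert _ _ _ (by simpa using PySem.Dict.nodup_keys_empty)

theorem pvLevelBfs_out (adj : List (Int × List Int)) (u : Int) :
    PvOut adj (fun _ => true) u (pvLevelBfs adj u) := by
  unfold pvLevelBfs
  exact pvLevel_out (pvFuel adj) _ _ 0 (pvLB_init adj u) (by simp)

-- ---- A's restricted-BFS check ↔ B's local predecessor test ----

theorem pvL0 {adj : List (Int × List Int)} {keep : Int → Bool} {u : Int}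
    {Df Dr : PySem.Dict Int Int}
    (Of : PvOut adj (fun _ => true) u Df) (Or : PvOut adj keep u Dr) :
    ∀ v dv, Dr.get? v = some dv → ∃ d, Df.get? v = some d ∧ d ≤ dv := by
  have main : ∀ (n : Nat) (v : Int) (dv : Int), Dr.get? v = some dv → dv.toNat ≤ n →
      ∃ d, Df.get? v = some d ∧ d ≤ dv := by
    intro n
    induction n with
    | zero =>
      intro v dv hv hn
      by_cases hvu : v = u
      · subst hvu
        have : dv = 0 := by rw [Or.at_u] at hv; exact (Option.some.inj hv).symm
        exact ⟨0, Of.at_u, by omega⟩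
      · rcases Or.parent v dv hv hvu with ⟨_, w, dw, hw, hmemw, heq, hnn⟩
        omega
    | succ n ih =>
      intro v dv hv hn
      by_cases hvu : v = u
      · subst hvu
        have : dv = 0 := by rw [Or.at_u] at hv; exact (Option.some.inj hv).symm
        exact ⟨0, Of.at_u, by omega⟩
      · rcases Or.parent v dv hv hvu with ⟨_, w, dw, hw, hmemw, heq, hnn⟩
        rcases ih w dw hw (by omega) with ⟨d', hd', hle⟩
        rcases Of.complete w d' hd' v hmemw rfl with ⟨dx, hdx, hxle⟩
        exact ⟨dx, hdx, by omega⟩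
  intro v dv hv
  exact main dv.toNat v dv hv (le_refl _)

-- the full-BFS dictionary is unique up to get?: A's and B's full BFS agree pointwise
theorem pvOut_ext {adj : List (Int × List Int)} {u : Int} {D1 D2 : PySem.Dict Int Int}
    (O1 : PvOut adj (fun _ => true) u D1) (O2 : PvOut adj (fun _ => true) u D2) :
    ∀ x, D1.get? x = D2.get? x := by
  intro x
  rcases h1 : D1.get? x with _ | a
  · rcases h2 : D2.get? x with _ | b
    · rfl
    · rcases pvL0 O1 O2 x b h2 with ⟨d, hd, _⟩
      rw [h1] at hd; cases hd
  · rcases pvL0 O2 O1 x a h1 with ⟨b, hb, hba⟩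
    rcases pvL0 O1 O2 x b hb with ⟨a', ha', hab⟩
    rw [h1] at ha'
    have h3 : a = a' := Option.some.inj ha'
    have heq : a = b := by omega
    rw [hb, heq]

def PvA (S_set : List Int) (u : Int) (Df Dr : PySem.Dict Int Int) : Prop :=
  ∀ v ∈ S_set, v ≠ u → ∃ r, Dr.get? v = some r ∧ Df.get? v = some r

def PvB (S_set : List Int) (adj : List (Int × List Int)) (u : Int)
    (Df : PySem.Dict Int Int) : Prop :=
  ∀ v ∈ S_set, v ≠ u → ∃ d, Df.get? v = some d ∧
    ∃ w ∈ S_set, Df.get? w = some (d - 1) ∧ v ∈ pvAdjGet adj w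

theorem pvAtoB {S_set : List Int} {adj : List (Int × List Int)} {u : Int}
    {Df Dr : PySem.Dict Int Int} (hu : u ∈ S_set)
    (Of : PvOut adj (fun _ => true) u Df)
    (Or : PvOut adj (fun w => S_set.contains w) u Dr)
    (ha : PvA S_set u Df Dr) : PvB S_set adj u Df := by
  intro v hv hvu
  rcases ha v hv hvu with ⟨r, hrv, hfv⟩
  refine ⟨r, hfv, ?_⟩
  rcases Or.parent v r hrv hvu with ⟨_, w, dw, hw, hmemw, heq, hnn⟩
  have hwS : w ∈ S_set := by
    by_cases hwu : w = u
    · subst hwu; exact hu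
    · rcases Or.parent w dw hw hwu with ⟨hk, _⟩
      simpa using hk
  refine ⟨w, hwS, ?_, hmemw⟩
  by_cases hwu : w = u
  · subst hwu
    have : dw = 0 := by rw [Or.at_u] at hw; exact (Option.some.inj hw).symm
    rw [Of.at_u]
    congr 1
    omega
  · rcases ha w hwS hwu with ⟨rw', hrw, hfw⟩
    have : rw' = dw := by rw [hw] at hrw; exact (Option.some.inj hrw).symm
    rw [hfw]
    congr 1
    omega

theorem pvBtoA {S_set : List Int} {adj : List (Int × List Int)} {u : Int}
    {Df Dr : PySem.Dict Int Int} (hu : u ∈ S_set)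
    (Of : PvOut adj (fun _ => true) u Df)
    (Or : PvOut adj (fun w => S_set.contains w) u Dr)
    (hb : PvB S_set adj u Df) : PvA S_set u Df Dr := by
  have main : ∀ (n : Nat) (v : Int), v ∈ S_set → v ≠ u → ∀ d, Df.get? v = some d →
      d.toNat ≤ n → Dr.get? v = some d := by
    intro n
    induction n with
    | zero =>
      intro v hv hvu d hd hn
      rcases hb v hv hvu with ⟨d', hd', w, hwS, hw, hmemw⟩
      have hdd : d' = d := by rw [hd] at hd'; exact (Option.some.inj hd').symm
      subst hdd
      have : (0:Int) ≤ d' - 1 := Of.nonneg w (d'-1) hw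
      omega
    | succ n ih =>
      intro v hv hvu d hd hn
      rcases hb v hv hvu with ⟨d', hd', w, hwS, hw, hmemw⟩
      have hdd : d' = d := by rw [hd] at hd'; exact (Option.some.inj hd').symm
      subst hdd
      have hnn : (0:Int) ≤ d' - 1 := Of.nonneg w (d'-1) hw
      have hrw : Dr.get? w = some (d' - 1) := by
        by_cases hwu : w = u
        · subst hwu
          have : d' - 1 = 0 := by rw [Of.at_u] at hw; exact (Option.some.inj hw).symm
          rw [Or.at_u]; congr 1; omega
        · exact ih w hwS hwu (d' - 1) hw (by omega)
      rcases Or.complete w (d' - 1) hrw v hmemw (by simpa using hv) with ⟨rv, hrv, hrle⟩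
      rcases pvL0 Of Or v rv hrv with ⟨d'', hd'', hdle⟩
      have h1 : d'' = d' := by rw [hd] at hd''; exact (Option.some.inj hd'').symm
      have h2 : rv = d' := by omega
      rw [h2] at hrv
      exact hrv
  intro v hv hvu
  rcases hcase : Df.get? v with _ | d
  · rcases hb v hv hvu with ⟨d', hd', _⟩
    rw [hcase] at hd'; cases hd'
  · exact ⟨d, main d.toNat v hv hvu d hcase (le_refl _), rfl⟩

theorem pv_all_congr_mem {l : List Int} {f g : Int → Bool}
    (h : ∀ x ∈ l, f x = g x) : l.all f = l.all g := by
  induction l with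
  | nil => rfl
  | cons a l ih =>
    simp only [List.all_cons]
    rw [h a (by simp), ih (fun x hx => h x (by simp [hx]))]

theorem pvInner_eq {S_set : List Int} {adj : List (Int × List Int)} {u : Int}
    {Df Dr : PySem.Dict Int Int} (hu : u ∈ S_set)
    (hOf : PvOut adj (fun _ => true) u Df)
    (hOr : PvOut adj (fun w => S_set.contains w) u Dr) :
    (S_set.all (fun v =>
      if v == u then true
      else if !(Dr.contains v) then false
      else Dr.getD v 0 == Df.getD v 0))
    = (S_set.all (fun v =>
      if v == u then true
      else if !(Df.contains v) then false
      else S_set.any (fun w =>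
        (Df.get? w == some (Df.getD v 0 - 1)) && (pvAdjGet adj w).contains v))) := by
  have fA_iff : ∀ v ∈ S_set,
      ((if v == u then true
        else if !(Dr.contains v) then false
        else Dr.getD v 0 == Df.getD v 0) = true)
      ↔ (v = u ∨ ∃ r, Dr.get? v = some r ∧ Df.get? v = some r) := by
    intro v _
    by_cases hvu : v = u
    · simp [hvu]
    · by_cases hc : Dr.contains v = true
      · have hsome : (Dr.get? v).isSome = true := by
          rw [← PySem.Dict.contains_eq_isSome_get?]; exact hc
        rcases Option.isSome_iff_exists.mp hsome with ⟨r, hrv⟩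
        have hred : (if v == u then true
            else if !(Dr.contains v) then false
            else Dr.getD v 0 == Df.getD v 0) = (Dr.getD v 0 == Df.getD v 0) := by
          simp [hvu, hc]
        rw [hred, PySem.Dict.getD_of_get?_eq_some Dr 0 hrv]
        constructor
        · intro h
          have hr : r = Df.getD v 0 := by simpa using h
          rcases pvL0 hOf hOr v r hrv with ⟨d, hd, hle⟩
          have hgd : Df.getD v 0 = d := PySem.Dict.getD_of_get?_eq_some Df 0 hd
          refine Or.inr ⟨r, hrv, ?_⟩
          rw [hd]
          congr 1
          omega
        · rintro (h | ⟨r', h1, h2⟩)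
          · exact absurd h hvu
          · have : r' = r := by rw [hrv] at h1; exact (Option.some.inj h1).symm
            subst this
            rw [PySem.Dict.getD_of_get?_eq_some Df 0 h2]
            simp
      · have hnone : Dr.get? v = none :=
          (PySem.Dict.get?_eq_none_iff_contains Dr v).mpr (by simpa using hc)
        have hred : (if v == u then true
            else if !(Dr.contains v) then false
            else Dr.getD v 0 == Df.getD v 0) = false := by
          simp [hvu, hc]
        rw [hred]
        constructor
        · intro h; cases h
        · rintro (h | ⟨r, h1, _⟩)
          · exact absurd h hvu
          · rw [hnone] at h1; cases h1
  have fB_iff : ∀ v ∈ S_set,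
      ((if v == u then true
        else if !(Df.contains v) then false
        else S_set.any (fun w =>
          (Df.get? w == some (Df.getD v 0 - 1)) && (pvAdjGet adj w).contains v)) = true)
      ↔ (v = u ∨ ∃ d, Df.get? v = some d ∧
          ∃ w ∈ S_set, Df.get? w = some (d - 1) ∧ v ∈ pvAdjGet adj w) := by
    intro v _
    by_cases hvu : v = u
    · simp [hvu]
    · by_cases hc : Df.contains v = true
      · have hsome : (Df.get? v).isSome = true := by
          rw [← PySem.Dict.contains_eq_isSome_get?]; exact hc
        rcases Option.isSome_iff_exists.mp hsome with ⟨d, hdv⟩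
        have hred : (if v == u then true
            else if !(Df.contains v) then false
            else S_set.any (fun w =>
              (Df.get? w == some (Df.getD v 0 - 1)) && (pvAdjGet adj w).contains v))
            = S_set.any (fun w =>
              (Df.get? w == some (Df.getD v 0 - 1)) && (pvAdjGet adj w).contains v) := by
          simp [hvu, hc]
        rw [hred, List.any_eq_true]
        have hgd : Df.getD v 0 = d := PySem.Dict.getD_of_get?_eq_some Df 0 hdv
        constructor
        · rintro ⟨w, hw, hcond⟩
          rcases Bool.and_eq_true_iff.mp hcond with ⟨h1, h2⟩
          rw [hgd] at h1
          exact Or.inr ⟨d, hdv, w, hw, by simpa using h1, by simpa using h2⟩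
        · rintro (h | ⟨d', hd', w, hw, hgw, hmemw⟩)
          · exact absurd h hvu
          · have : d' = d := by rw [hdv] at hd'; exact (Option.some.inj hd').symm
            subst this
            exact ⟨w, hw, by simp [hgd, hgw, hmemw]⟩
      · have hnone : Df.get? v = none :=
          (PySem.Dict.get?_eq_none_iff_contains Df v).mpr (by simpa using hc)
        have hred : (if v == u then true
            else if !(Df.contains v) then false
            else S_set.any (fun w =>
              (Df.get? w == some (Df.getD v 0 - 1)) && (pvAdjGet adj w).contains v)) = false := by
          simp [hvu, hc]
        rw [hred]
        constructor
        · intro h; cases h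
        · rintro (h | ⟨d, h1, _⟩)
          · exact absurd h hvu
          · rw [hnone] at h1; cases h1
  apply Bool.coe_iff_coe.mp
  rw [List.all_eq_true, List.all_eq_true]
  constructor
  · intro h v hv
    rw [fB_iff v hv]
    by_cases hvu : v = u
    · exact Or.inl hvu
    · have ha : PvA S_set u Df Dr := by
        intro x hx hxu
        rcases (fA_iff x hx).mp (h x hx) with h1 | h1
        · exact absurd h1 hxu
        · exact h1
      exact Or.inr (pvAtoB hu hOf hOr ha v hv hvu)
  · intro h v hv
    rw [fA_iff v hv]
    by_cases hvu : v = u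
    · exact Or.inl hvu
    · have hb : PvB S_set adj u Df := by
        intro x hx hxu
        rcases (fB_iff x hx).mp (h x hx) with h1 | h1
        · exact absurd h1 hxu
        · exact h1
      exact Or.inr (pvBtoA hu hOf hOr hb v hv hvu)

-- B's inner test only reads get?, so pointwise-equal dictionaries give the same value
theorem pvInnerB_congr {S_set : List Int} {adj : List (Int × List Int)} {u : Int}
    {D1 D2 : PySem.Dict Int Int} (h : ∀ x, D1.get? x = D2.get? x) :
    (S_set.all (fun v =>
      if v == u then true
      else if !(D1.contains v) then false
      else S_set.any (fun w =>
        (D1.get? w == some (D1.getD v 0 - 1)) && (pvAdjGet adj w).contains v)))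
    = (S_set.all (fun v =>
      if v == u then true
      else if !(D2.contains v) then false
      else S_set.any (fun w =>
        (D2.get? w == some (D2.getD v 0 - 1)) && (pvAdjGet adj w).contains v))) := by
  have hc : ∀ x, D1.contains x = D2.contains x := fun x => by
    rw [PySem.Dict.contains_eq_isSome_get?, PySem.Dict.contains_eq_isSome_get?, h x]
  have hg : ∀ x, D1.getD x 0 = D2.getD x 0 := fun x => by
    rw [PySem.Dict.getD_eq_get?_getD, PySem.Dict.getD_eq_get?_getD, h x]
  simp only [h, hc, hg]

-- ===== VERDICT (by name: the statement is the Claim_ definition above) =====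
theorem is_convex_spec : Claim_equal_is_convex := by
  intro S_set chambers adj _ _
  unfold Spec_is_convex is_convex is_convex_alt
  apply pv_all_congr_mem
  intro u hu
  exact (pvInner_eq hu (pvBfs_out adj _ u) (pvBfs_out adj _ u)).trans
    (pvInnerB_congr (pvOut_ext (pvBfs_out adj (fun _ => true) u) (pvLevelBfs_out adj u)))
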